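-- pv_equiv track=rewrite | github.com/ChaosAIs/DocumentsToMarkdown | services/pdf_converter.py | _looks_like_table
-- ===== SOURCE A (Python) =====
-- def _looks_like_table(text: str) -> bool:
--     """
--     Check if text looks like tabular data.
--
--     Args:
--         text: Text to analyze
--
--     Returns:
--         True if text appears to be tabular
--     """
--     lines = text.split('\n')
--     if len(lines) < 2:
--         return False
--
--     # Check for consistent column separators
--     separators = ['\t', '  ', ' | ', '|']
--     for sep in separators:
--         if all(sep in line for line in lines if line.strip()):
--             return True
--
--     return False
-- ===== SOURCE B (Python) =====
-- def _looks_like_table(text: str) -> bool: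
--     """Single pass: shrink the set of separators consistent with every non-blank line."""
--     lines = text.split('\n')
--     if len(lines) < 2:
--         return False
--     candidates = ['\t', '  ', ' | ', '|']
--     for line in lines:
--         if line.strip():
--             candidates = [s for s in candidates if s in line]
--             if not candidates:
--                 return False
--     return bool(candidates)
-- ===== Notes on version B (the rewrite author's own statement) =====
-- stated objective: alternative
-- what changed: Inverted the loop nesting: instead of testing each separator against all lines (up to 4 full passes), B makes one pass over the lines maintaining the list of separators still present in every non-blank line seen, with an early exit when it empties.
import Mathlib
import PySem

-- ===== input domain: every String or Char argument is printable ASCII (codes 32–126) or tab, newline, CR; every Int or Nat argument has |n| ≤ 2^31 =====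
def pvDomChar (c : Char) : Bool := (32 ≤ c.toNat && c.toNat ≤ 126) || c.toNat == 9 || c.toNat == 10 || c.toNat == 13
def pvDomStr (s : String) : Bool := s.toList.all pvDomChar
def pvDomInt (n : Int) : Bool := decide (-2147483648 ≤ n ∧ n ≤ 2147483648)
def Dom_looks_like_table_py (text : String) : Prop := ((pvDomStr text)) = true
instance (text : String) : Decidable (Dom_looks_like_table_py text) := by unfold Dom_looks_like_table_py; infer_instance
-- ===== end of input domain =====

-- B inverts the loop nesting: one pass over the lines maintaining the separators
-- still present in every non-blank line seen so far (early exit when none remain).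


-- ===== PORT A =====
-- for sep in separators: if all(sep in line for line in lines if line.strip()): return True
-- (lines handled as List Char via PySem.Chars — exact for str.split('\n'), strip and 'in')
def looks_like_table_py (text : String) : Bool :=
  let lines := PySem.Chars.splitOn text.toList ['\n']
  if lines.length < 2 then false
  else
    let separators : List (List Char) := [['\t'], [' ', ' '], [' ', '|', ' '], ['|']]
    separators.any (fun sep =>
      (lines.filter (fun line => !(PySem.Chars.strip line).isEmpty)).all
        (fun line => PySem.Chars.isIn sep line))

-- ===== PORT B =====
-- the for-line loop of Source B, carrying the surviving candidate separators
def pvAltLoop (cands : List (List Char)) (lines : List (List Char)) : Bool :=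
  match lines with
  | [] => !cands.isEmpty            -- return bool(candidates)
  | line :: rest =>
    if !(PySem.Chars.strip line).isEmpty then
      let c := cands.filter (fun s => PySem.Chars.isIn s line)
      if c.isEmpty then false       -- early return False
      else pvAltLoop c rest
    else pvAltLoop cands rest

def looks_like_table_py_alt (text : String) : Bool :=
  let lines := PySem.Chars.splitOn text.toList ['\n']
  if lines.length < 2 then false
  else pvAltLoop [['\t'], [' ', ' '], [' ', '|', ' '], ['|']] lines

-- ===== PRECONDITION & SPEC =====
def Spec_looks_like_table_py (text : String) (out : Bool) : Prop := out = looks_like_table_py_alt text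
instance (text : String) (out : Bool) : Decidable (Spec_looks_like_table_py text out) := by unfold Spec_looks_like_table_py; infer_instance

-- ===== CLAIM (what is proved, stated in full; the proofs are below) =====
def Claim_equal_looks_like_table_py : Prop := ∀ (text : String), Dom_looks_like_table_py text → Spec_looks_like_table_py text (looks_like_table_py text)

-- ===== LEMMAS AND PROOFS =====

-- any p = "the filter by p is non-empty"
theorem pv_any_eq_not_isEmpty_filter {α : Type} (l : List α) (p : α → Bool) :
    l.any p = !(l.filter p).isEmpty := by
  induction l with
  | nil => rfl
  | cons a t ih =>
    by_cases h : p a = true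
    · simp [List.any_cons, List.filter_cons, h]
    · simp only [Bool.not_eq_true] at h
      simp [List.any_cons, List.filter_cons, h, ih]

-- B's loop computes: are any candidates contained in every non-blank line?
theorem pvAltLoop_eq (lines : List (List Char)) : ∀ (cands : List (List Char)),
    pvAltLoop cands lines =
      !(cands.filter (fun s =>
          (lines.filter (fun line => !(PySem.Chars.strip line).isEmpty)).all
            (fun line => PySem.Chars.isIn s line))).isEmpty := by
  induction lines with
  | nil => intro cands; simp [pvAltLoop]
  | cons line rest ih =>
    intro cands
    by_cases hb : (PySem.Chars.strip line).isEmpty = true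
    · rw [show pvAltLoop cands (line :: rest) = pvAltLoop cands rest by
        simp only [pvAltLoop, hb, Bool.not_true]; rfl]
      rw [ih]
      congr 2
      simp [List.filter_cons, hb]
    · simp only [Bool.not_eq_true] at hb
      have hstep :
          cands.filter (fun s =>
            ((line :: rest).filter (fun l => !(PySem.Chars.strip l).isEmpty)).all
              (fun l => PySem.Chars.isIn s l))
          = (cands.filter (fun s => PySem.Chars.isIn s line)).filter (fun s =>
              (rest.filter (fun l => !(PySem.Chars.strip l).isEmpty)).all
                (fun l => PySem.Chars.isIn s l)) := by
        rw [List.filter_filter]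
        congr 1
        funext s
        simp [List.filter_cons, hb, Bool.and_comm]
      rw [hstep]
      rw [show pvAltLoop cands (line :: rest) =
          (if (cands.filter (fun s => PySem.Chars.isIn s line)).isEmpty then false
           else pvAltLoop (cands.filter (fun s => PySem.Chars.isIn s line)) rest) by
        simp only [pvAltLoop, hb, Bool.not_false]; rfl]
      by_cases hc : (cands.filter (fun s => PySem.Chars.isIn s line)).isEmpty = true
      · rw [List.isEmpty_iff] at hc
        rw [hc]
        simp
      · simp only [Bool.not_eq_true] at hc
        rw [if_neg (by simp [hc]), ih]

-- ===== VERDICT (by name: the statement is the Claim_ definition above) =====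
theorem looks_like_table_py_spec : Claim_equal_looks_like_table_py := by
  intro text _
  unfold Spec_looks_like_table_py looks_like_table_py looks_like_table_py_alt
  simp only [pvAltLoop_eq, pv_any_eq_not_isEmpty_filter]
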